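-- pv_equiv track=rewrite | github.com/KwonTaeyong/Python_v7 | learning129.py | solution
-- ===== SOURCE A (Python) =====
-- def solution(land, P, Q):
--     arr = []
--     for row in land:
--         arr.extend(row)
--     arr.sort()
--
--     def cost(h):
--         total = 0
--         for v in arr:
--             if v < h:
--                 total += (h - v) * P
--             else:
--                 total += (v - h) * Q
--         return total
--
--     left, right = arr[0], arr[-1]
--
--     # 삼분 탐색
--     while left + 3 < right:
--         m1 = (2 * left + right) // 3
--         m2 = (left + 2 * right) // 3
--         if cost(m1) <= cost(m2):
--             right = m2
--         else:
--             left = m1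
--
--     # 근처 범위에서 정확한 최소값 검색
--     answer = float('inf')
--     for h in range(left, right + 1):
--         answer = min(answer, cost(h))
--
--     return answer
-- ===== SOURCE B (Python) =====
-- def solution(land, P, Q):
--     arr = sorted(v for row in land for v in row)
--     n = len(arr)
--     pre = [0]
--     s = 0
--     for v in arr:
--         s += v
--         pre.append(s)
--     total = pre[n]
--
--     def cost(h):
--         # O(log n): count/sum of values below h via hand-rolled bisect + prefix sums
--         lo, hi = 0, n
--         while lo < hi:
--             mid = (lo + hi) // 2
--             if arr[mid] < h:
--                 lo = mid + 1
--             else: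
--                 hi = mid
--         k = lo
--         below = pre[k]
--         return (h * k - below) * P + ((total - below) - h * (n - k)) * Q
--
--     left, right = arr[0], arr[-1]
--     while left + 3 < right:
--         m1 = (2 * left + right) // 3
--         m2 = (left + 2 * right) // 3
--         if cost(m1) <= cost(m2):
--             right = m2
--         else:
--             left = m1
--
--     return min(cost(h) for h in range(left, right + 1))
-- ===== Notes on version B (the rewrite author's own statement) =====
-- stated objective: faster
-- what changed: A's inner cost(h) rescans the whole flattened array for every probed height; B precomputes prefix sums once and evaluates each cost(h) with a hand-rolled binary search plus two closed-form terms, so each ternary-search step costs O(log n) instead of O(n).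
import Mathlib
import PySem

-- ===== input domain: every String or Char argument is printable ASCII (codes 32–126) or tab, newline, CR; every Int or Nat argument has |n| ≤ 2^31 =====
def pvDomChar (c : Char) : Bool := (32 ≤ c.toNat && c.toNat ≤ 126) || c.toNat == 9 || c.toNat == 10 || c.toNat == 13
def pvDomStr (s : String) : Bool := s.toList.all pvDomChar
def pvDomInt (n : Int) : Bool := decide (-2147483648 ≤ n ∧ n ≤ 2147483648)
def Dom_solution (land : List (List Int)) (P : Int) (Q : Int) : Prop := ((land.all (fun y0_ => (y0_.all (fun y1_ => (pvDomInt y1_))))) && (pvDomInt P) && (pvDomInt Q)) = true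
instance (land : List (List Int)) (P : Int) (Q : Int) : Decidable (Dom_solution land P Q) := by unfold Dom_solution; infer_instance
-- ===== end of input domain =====

-- B replaces A's O(n) inner cost loop by prefix sums + a hand-rolled binary search, making each
-- cost evaluation O(log n) inside the unchanged ternary-search skeleton (objective: faster).

-- ===== PORT A =====
-- cost(h): the inner O(n) loop over arr
def costA (P Q : Int) (arr : List Int) (h : Int) : Int :=
  arr.foldl (fun total v => if v < h then total + (h - v) * P else total + (v - h) * Q) 0

-- the ternary-search while loop; fuel = (right - left).toNat is a totality guard only:
-- each iteration shrinks right - left by at least 1 and the loop stops once right - left ≤ 3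
def loopA (arr : List Int) (P Q : Int) : Nat → Int → Int → Int × Int
  | 0, left, right => (left, right)
  | fuel + 1, left, right =>
      if left + 3 < right then
        let m1 := PySem.Int.floordiv (2 * left + right) 3
        let m2 := PySem.Int.floordiv (left + 2 * right) 3
        if costA P Q arr m1 ≤ costA P Q arr m2 then loopA arr P Q fuel left m2
        else loopA arr P Q fuel m1 right
      else (left, right)

def solution (land : List (List Int)) (P : Int) (Q : Int) : Int :=
  let arr := PySem.List.sorted (land.foldl (fun acc row => acc ++ row) []) (fun x => x)
  -- arr[0] / arr[-1]: IndexError when arr = [] — excluded by Pre_solution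
  let left := (PySem.List.pyGet? arr 0).getD 0
  let right := (PySem.List.pyGet? arr (-1)).getD 0
  let lr := loopA arr P Q (right - left).toNat left right
  -- answer = float('inf'); for h in range(left, right+1): answer = min(answer, cost(h))
  -- inf modeled as none; the range is nonempty under Pre_solution, so the getD 0 is never reached
  ((PySem.List.pyRange lr.1 (lr.2 + 1) 1).foldl
      (fun (acc : Option Int) h => some (match acc with
        | none => costA P Q arr h
        | some a => min a (costA P Q arr h))) none).getD 0

-- ===== PORT B =====
-- the hand-rolled bisect-left while loop of Source B; fuel = hi - lo is a totality guard only
-- (the interval shrinks every iteration); arr[mid] is always in range: lo ≤ mid < hi ≤ len arr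
def blB (arr : List Int) (h : Int) : Nat → Nat → Nat → Nat
  | 0, lo, _ => lo
  | fuel + 1, lo, hi =>
      if lo < hi then
        let mid := (lo + hi) / 2
        if arr.getD mid 0 < h then blB arr h fuel (mid + 1) hi
        else blB arr h fuel lo mid
      else lo

-- the prefix-sum building loop of Source B: returns (pre, s)
def preSums (arr : List Int) : List Int × Int :=
  arr.foldl (fun ps v => (ps.1 ++ [ps.2 + v], ps.2 + v)) ([0], 0)

-- cost(h) via bisect + prefix sums
def costB (arr pre : List Int) (n : Nat) (total P Q : Int) (h : Int) : Int :=
  let k := blB arr h n 0 n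
  let below := pre.getD k 0
  (h * (k : Int) - below) * P + ((total - below) - h * ((n : Int) - (k : Int))) * Q

-- same ternary-search skeleton as A, with the fast cost; same fuel totality guard
def loopB (arr pre : List Int) (n : Nat) (total P Q : Int) : Nat → Int → Int → Int × Int
  | 0, left, right => (left, right)
  | fuel + 1, left, right =>
      if left + 3 < right then
        let m1 := PySem.Int.floordiv (2 * left + right) 3
        let m2 := PySem.Int.floordiv (left + 2 * right) 3
        if costB arr pre n total P Q m1 ≤ costB arr pre n total P Q m2 then
          loopB arr pre n total P Q fuel left m2
        else loopB arr pre n total P Q fuel m1 right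
      else (left, right)

def solution_alt (land : List (List Int)) (P : Int) (Q : Int) : Int :=
  let arr := PySem.List.sorted (land.flatMap (fun row => row)) (fun x => x)
  let n := arr.length
  let pre := (preSums arr).1
  let total := pre.getD n 0
  -- arr[0] / arr[-1]: IndexError when arr = [] — excluded by Pre_solution
  let left := (PySem.List.pyGet? arr 0).getD 0
  let right := (PySem.List.pyGet? arr (-1)).getD 0
  let lr := loopB arr pre n total P Q (right - left).toNat left right
  -- min(cost(h) for h in range(left, right+1)); the range is nonempty under Pre_solution
  ((PySem.List.pyRange lr.1 (lr.2 + 1) 1).foldl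
      (fun (acc : Option Int) h => some (match acc with
        | none => costB arr pre n total P Q h
        | some a => min a (costB arr pre n total P Q h))) none).getD 0

-- ===== PRECONDITION & SPEC =====
-- Pre_ excludes exactly the inputs with no land values at all, on which Python A raises IndexError at arr[0].
def Pre_solution (land : List (List Int)) (_P : Int) (_Q : Int) : Prop :=
  land.flatMap (fun row => row) ≠ []
instance (land : List (List Int)) (P : Int) (Q : Int) : Decidable (Pre_solution land P Q) := by
  unfold Pre_solution; infer_instance

def pvWitness_solution : List (List Int) × Int × Int := ([[3, 1], [4]], 2, 5)

def Spec_solution (land : List (List Int)) (P : Int) (Q : Int) (out : Int) : Prop := out = solution_alt land P Q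
instance (land : List (List Int)) (P : Int) (Q : Int) (out : Int) : Decidable (Spec_solution land P Q out) := by unfold Spec_solution; infer_instance

-- ===== CLAIM (what is proved, stated in full; the proofs are below) =====
def Claim_equal_solution : Prop := ∀ (land : List (List Int)) (P : Int) (Q : Int), Dom_solution land P Q → Pre_solution land P Q → Spec_solution land P Q (solution land P Q)

-- ===== LEMMAS AND PROOFS =====

-- the prefix-sum loop computes all partial sums
theorem preSums_eq (arr : List Int) :
    preSums arr = ((List.range (arr.length + 1)).map (fun k => (arr.take k).sum), arr.sum) := by
  induction arr using List.reverseRecOn with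
  | nil => rfl
  | append_singleton l x ih =>
      unfold preSums at *
      rw [List.foldl_append, ih]
      simp only [List.foldl_cons, List.foldl_nil, List.length_append, List.length_singleton,
        Prod.mk.injEq]
      constructor
      · rw [List.range_succ (n := l.length + 1), List.map_append]
        congr 1
        · apply List.map_congr_left
          intro k hk
          rw [List.mem_range] at hk
          rw [List.take_append]
          have : k - l.length = 0 := by omega
          simp [this]
        · simp [List.take_append, List.take_of_length_le]
      · simp

-- the bisect loop's invariant: everything left of the result is < h, everything right of it is ≥ h
theorem blB_inv (arr : List Int) (h : Int) (hs : arr.Pairwise (· ≤ ·)) :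
    ∀ fuel lo hi, lo ≤ hi → hi ≤ arr.length → hi - lo ≤ fuel →
    (∀ j (_ : j < arr.length), j < lo → arr[j] < h) →
    (∀ j (_ : j < arr.length), hi ≤ j → ¬ arr[j] < h) →
    blB arr h fuel lo hi ≤ arr.length ∧
      (∀ j (_ : j < arr.length), j < blB arr h fuel lo hi → arr[j] < h) ∧
      (∀ j (_ : j < arr.length), blB arr h fuel lo hi ≤ j → ¬ arr[j] < h) := by
  intro fuel
  induction fuel with
  | zero =>
      intro lo hi hle hlen hfuel hbelow habove
      have : lo = hi := by omega
      subst this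
      rw [blB]
      exact ⟨by omega, hbelow, habove⟩
  | succ fuel ih =>
      intro lo hi hle hlen hfuel hbelow habove
      rw [blB]
      by_cases hlt : lo < hi
      · simp only [hlt, if_pos]
        have hmidlt : (lo + hi) / 2 < hi := by omega
        have hmidge : lo ≤ (lo + hi) / 2 := by omega
        have hmlen : (lo + hi) / 2 < arr.length := by omega
        rw [List.getD_eq_getElem _ _ hmlen]
        by_cases hc : arr[(lo + hi) / 2] < h
        · simp only [hc, if_pos]
          refine ih ((lo + hi) / 2 + 1) hi (by omega) hlen (by omega) ?_ habove
          intro j hj hjlt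
          rcases Nat.lt_or_ge j lo with h1 | h1
          · exact hbelow j hj h1
          · calc arr[j] ≤ arr[(lo + hi) / 2] := by
                  rcases Nat.eq_or_lt_of_le (by omega : j ≤ (lo + hi) / 2) with he | hl
                  · subst he; exact le_refl _
                  · exact List.pairwise_iff_getElem.mp hs j _ hj hmlen hl
              _ < h := hc
        · simp only [hc, if_false]
          refine ih lo ((lo + hi) / 2) (by omega) (by omega) (by omega) hbelow ?_
          intro j hj hjge hcon
          apply hc
          calc arr[(lo + hi) / 2] ≤ arr[j] := by
                rcases Nat.eq_or_lt_of_le hjge with he | hl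
                · subst he; exact le_refl _
                · exact List.pairwise_iff_getElem.mp hs _ j hmlen hj hl
            _ < h := hcon
      · simp only [hlt, if_false]
        have : lo = hi := by omega
        subst this
        exact ⟨by omega, hbelow, habove⟩

-- closed forms for the two branch sums
theorem sum_map_below (l : List Int) (P h : Int) :
    (l.map (fun v => (h - v) * P)).sum = (h * l.length - l.sum) * P := by
  induction l with
  | nil => simp
  | cons x t ih => simp [ih]; ring

theorem sum_map_above (l : List Int) (Q h : Int) :
    (l.map (fun v => (v - h) * Q)).sum = (l.sum - h * l.length) * Q := by
  induction l with
  | nil => simp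
  | cons x t ih => simp [ih]; ring

-- the heart of the equivalence: the O(log n) cost equals the O(n) cost on the sorted array
theorem cost_eq (arr : List Int) (hs : arr.Pairwise (· ≤ ·)) (P Q h : Int) :
    costB arr (preSums arr).1 arr.length ((preSums arr).1.getD arr.length 0) P Q h
      = costA P Q arr h := by
  obtain ⟨hk, hbelow, habove⟩ :=
    blB_inv arr h hs arr.length 0 arr.length (by omega) (le_refl _) (by omega)
      (by omega) (by intro j hj hji; omega)
  set k := blB arr h arr.length 0 arr.length with hkdef
  have hpre : (preSums arr).1 = (List.range (arr.length + 1)).map (fun k => (arr.take k).sum) := by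
    rw [preSums_eq]
  have hgetk : (preSums arr).1.getD k 0 = (arr.take k).sum := by
    rw [hpre, PySem.List.getD_map_range _ _ _ _ (by omega)]
  have hgetn : (preSums arr).1.getD arr.length 0 = arr.sum := by
    rw [hpre, PySem.List.getD_map_range _ _ _ _ (by omega)]
    simp
  -- rewrite costA as a sum over take k ++ drop k
  have hsplit : arr = arr.take k ++ arr.drop k := (List.take_append_drop k arr).symm
  have htlen : (arr.take k).length = k := List.length_take_of_le hk
  have hdlen : (arr.drop k).length = arr.length - k := List.length_drop ..
  have hdsum : (arr.drop k).sum = arr.sum - (arr.take k).sum := by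
    have h0 := List.sum_take_add_sum_drop arr k
    omega
  have hcostA : costA P Q arr h
      = ((arr.take k).map (fun v => (h - v) * P)).sum + ((arr.drop k).map (fun v => (v - h) * Q)).sum := by
    unfold costA
    have : ∀ (l : List Int) (a : Int),
        l.foldl (fun total v => if v < h then total + (h - v) * P else total + (v - h) * Q) a
          = a + (l.map (fun v => if v < h then (h - v) * P else (v - h) * Q)).sum := by
      intro l
      induction l with
      | nil => intro a; simp
      | cons x t ih => intro a; by_cases hx : x < h <;> simp [hx, ih] <;> ring
    rw [this, zero_add]
    conv_lhs => rw [hsplit]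
    rw [List.map_append, List.sum_append]
    congr 1
    · apply congrArg List.sum
      apply List.map_congr_left
      intro v hv
      obtain ⟨i, hi, rfl⟩ := List.mem_iff_getElem.mp hv
      have hik : i < k := by
        have := htlen; omega
      have higl : i < arr.length := by omega
      have : (arr.take k)[i] = arr[i] := List.getElem_take ..
      rw [this]
      simp [hbelow i higl hik]
    · apply congrArg List.sum
      apply List.map_congr_left
      intro v hv
      obtain ⟨i, hi, rfl⟩ := List.mem_iff_getElem.mp hv
      have : (arr.drop k)[i] = arr[k + i] := List.getElem_drop ..
      rw [this]
      have hkil : k + i < arr.length := by omega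
      simp [habove (k + i) hkil (by omega)]
  rw [hcostA, sum_map_below, sum_map_above]
  simp only [costB]
  rw [← hkdef, hgetk, hgetn, htlen, hdlen, hdsum]
  have hcast : ((arr.length - k : Nat) : Int) = (arr.length : Int) - (k : Int) := by omega
  rw [hcast]

-- the two ternary-search loops coincide once the cost functions agree pointwise
theorem loop_eq (arr pre : List Int) (n : Nat) (total P Q : Int)
    (hc : ∀ h, costB arr pre n total P Q h = costA P Q arr h) :
    ∀ fuel left right,
      loopB arr pre n total P Q fuel left right = loopA arr P Q fuel left right := by
  intro fuel
  induction fuel with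
  | zero => intro left right; rfl
  | succ fuel ih =>
      intro left right
      rw [loopA, loopB]
      simp only [hc]
      by_cases hlt : left + 3 < right
      · simp only [hlt, if_pos]
        split_ifs with hcmp <;> exact ih ..
      · simp only [hlt, if_false]

-- ===== VERDICT (by name: the statement is the Claim_ definition above) =====
theorem solution_spec : Claim_equal_solution := by
  intro land P Q _hdom _hpre
  unfold Spec_solution
  simp only [solution, solution_alt]
  rw [PySem.List.foldl_append_eq_flatMap, List.nil_append]
  set arr := PySem.List.sorted (land.flatMap (fun row => row)) (fun x => x) with harr
  have hs : arr.Pairwise (· ≤ ·) := PySem.List.sorted_pairwise _ _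
  have hc : ∀ h, costB arr (preSums arr).1 arr.length ((preSums arr).1.getD arr.length 0) P Q h
      = costA P Q arr h := fun h => cost_eq arr hs P Q h
  rw [loop_eq _ _ _ _ _ _ hc]
  simp only [hc]
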